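-- pv_equiv track=rewrite | github.com/jnward/reasoning-lora-interp | sae_interp/autointerp/categorization/create_compact_donut.py | create_custom_legend
-- ===== SOURCE A (Python) =====
-- def create_custom_legend(inner_labels, inner_colors, outer_labels, outer_colors, legend_mapping):
--     """Create a custom HTML legend with two columns."""
--     legend_html = ""
--
--     # Group subcategories by category
--     category_groups = {}
--     for i, (outer_label, outer_color) in enumerate(zip(outer_labels, outer_colors)):
--         parent = legend_mapping.get(outer_label)
--         if parent:
--             if parent not in category_groups:
--                 category_groups[parent] = []
--             category_groups[parent].append((outer_label, outer_color))
--
--     # Create legend entries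
--     for cat_label, cat_color in zip(inner_labels, inner_colors):
--         legend_html += f'''
--         <div class="legend-category">
--             <div class="legend-header">
--                 <span class="color-box" style="background-color: {cat_color};"></span>
--                 {cat_label}
--             </div>'''
--
--         # Add subcategories if they exist
--         if cat_label in category_groups:
--             for subcat_label, subcat_color in category_groups[cat_label]:
--                 # Shorten long labels
--                 display_label = subcat_label
--                 if len(display_label) > 20:
--                     display_label = display_label[:17] + "..."
--
--                 legend_html += f'''
--             <div class="legend-item">
--                 <span class="color-box" style="background-color: {subcat_color};"></span>
--                 {display_label}
--             </div>'''
--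
--         legend_html += '</div>'
--
--     return legend_html
-- ===== SOURCE B (Python) =====
-- def create_custom_legend(inner_labels, inner_colors, outer_labels, outer_colors, legend_mapping):
--     """Create a custom HTML legend with two columns."""
--     legend_html = ""
--
--     # One pass per category: rescan the outer entries instead of pre-grouping in a dict
--     for cat_label, cat_color in zip(inner_labels, inner_colors):
--         legend_html += f'''
--         <div class="legend-category">
--             <div class="legend-header">
--                 <span class="color-box" style="background-color: {cat_color};"></span>
--                 {cat_label}
--             </div>'''
--
--         for subcat_label, subcat_color in zip(outer_labels, outer_colors):
--             parent = legend_mapping.get(subcat_label)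
--             if parent and parent == cat_label:
--                 # Shorten long labels
--                 display_label = subcat_label
--                 if len(display_label) > 20:
--                     display_label = display_label[:17] + "..."
--
--                 legend_html += f'''
--             <div class="legend-item">
--                 <span class="color-box" style="background-color: {subcat_color};"></span>
--                 {display_label}
--             </div>'''
--
--         legend_html += '</div>'
--
--     return legend_html
-- ===== Notes on version B (the rewrite author's own statement) =====
-- stated objective: simpler
-- what changed: Drops the category_groups dict entirely: for each category the outer label/color pairs are rescanned and an item is emitted when its mapped parent is truthy and equals the category, instead of index-first grouping followed by a dict lookup.
import Mathlib
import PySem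

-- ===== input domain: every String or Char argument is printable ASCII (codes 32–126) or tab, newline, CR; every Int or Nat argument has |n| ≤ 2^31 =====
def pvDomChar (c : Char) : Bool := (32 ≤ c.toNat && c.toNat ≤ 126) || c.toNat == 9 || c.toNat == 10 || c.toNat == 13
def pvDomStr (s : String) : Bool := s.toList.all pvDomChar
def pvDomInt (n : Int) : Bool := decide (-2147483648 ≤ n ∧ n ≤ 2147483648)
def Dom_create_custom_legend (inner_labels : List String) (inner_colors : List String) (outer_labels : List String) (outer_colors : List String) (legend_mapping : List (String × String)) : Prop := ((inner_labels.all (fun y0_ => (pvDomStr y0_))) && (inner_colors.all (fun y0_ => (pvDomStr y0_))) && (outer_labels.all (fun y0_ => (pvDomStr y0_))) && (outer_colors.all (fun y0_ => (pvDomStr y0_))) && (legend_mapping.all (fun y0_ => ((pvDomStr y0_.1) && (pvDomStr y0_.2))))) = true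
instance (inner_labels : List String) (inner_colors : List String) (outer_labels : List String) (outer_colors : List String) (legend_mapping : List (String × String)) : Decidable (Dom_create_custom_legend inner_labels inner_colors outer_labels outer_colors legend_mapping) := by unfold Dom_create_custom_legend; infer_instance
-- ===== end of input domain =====

-- B drops A's category_groups dict: it rescans the outer pairs inside each category, emitting an
-- item when the mapped parent is truthy and equals the category (objective: simpler — same output).

-- Shared f-string templates and the >20-char shortening (byte-identical in both Pythons)
def pvHeader (cat_color cat_label : String) : String :=
  "\n        <div class=\"legend-category\">\n            <div class=\"legend-header\">\n                <span class=\"color-box\" style=\"background-color: " ++ cat_color ++ ";\"></span>\n                " ++ cat_label ++ "\n            </div>"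

def pvItem (subcat_color display_label : String) : String :=
  "\n            <div class=\"legend-item\">\n                <span class=\"color-box\" style=\"background-color: " ++ subcat_color ++ ";\"></span>\n                " ++ display_label ++ "\n            </div>"

-- display_label = subcat_label, shortened to [:17] + "..." when len > 20
def pvDisplay (s : String) : String :=
  if PySem.Str.len s > 20 then PySem.Str.slice s none (some 17) ++ "..." else s

-- ===== PORT A =====
-- A's grouping-loop body: parent = legend_mapping.get(outer_label); if parent (truthy = non-empty):
-- ensure the key exists, then append the pair (dict.get on the assoc list = first match = List.lookup)
def pvGroupStep (legend_mapping : List (String × String))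
    (d : PySem.Dict String (List (String × String))) (p : String × String) :
    PySem.Dict String (List (String × String)) :=
  match List.lookup p.1 legend_mapping with
  | none => d
  | some parent =>
    if parent ≠ "" then
      let d := if d.contains parent then d else d.insert parent []
      d.insert parent (d.getD parent [] ++ [p])
    else d

def create_custom_legend (inner_labels : List String) (inner_colors : List String) (outer_labels : List String) (outer_colors : List String) (legend_mapping : List (String × String)) : String :=
  let legend_html := ""
  let category_groups :=
    (outer_labels.zip outer_colors).foldl (pvGroupStep legend_mapping) PySem.Dict.empty
  (inner_labels.zip inner_colors).foldl
    (fun acc q =>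
      let acc := acc ++ pvHeader q.2 q.1
      let acc :=
        if category_groups.contains q.1 then
          (category_groups.getD q.1 []).foldl (fun a r => a ++ pvItem r.2 (pvDisplay r.1)) acc
        else acc
      acc ++ "</div>") legend_html

-- ===== PORT B =====
-- B's guard: parent = legend_mapping.get(subcat_label); parent and parent == cat_label
def pvMatch (legend_mapping : List (String × String)) (cat : String) (sub : String) : Bool :=
  match List.lookup sub legend_mapping with
  | none => false
  | some parent => !(parent == "") && parent == cat

def create_custom_legend_alt (inner_labels : List String) (inner_colors : List String) (outer_labels : List String) (outer_colors : List String) (legend_mapping : List (String × String)) : String :=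
  (inner_labels.zip inner_colors).foldl
    (fun acc q =>
      let acc := acc ++ pvHeader q.2 q.1
      let acc :=
        (outer_labels.zip outer_colors).foldl
          (fun a r => if pvMatch legend_mapping q.1 r.1 then a ++ pvItem r.2 (pvDisplay r.1) else a)
          acc
      acc ++ "</div>") ""

-- ===== PRECONDITION & SPEC =====
def Spec_create_custom_legend (inner_labels : List String) (inner_colors : List String) (outer_labels : List String) (outer_colors : List String) (legend_mapping : List (String × String)) (out : String) : Prop := out = create_custom_legend_alt inner_labels inner_colors outer_labels outer_colors legend_mapping
instance (inner_labels : List String) (inner_colors : List String) (outer_labels : List String) (outer_colors : List String) (legend_mapping : List (String × String)) (out : String) : Decidable (Spec_create_custom_legend inner_labels inner_colors outer_labels outer_colors legend_mapping out) := by unfold Spec_create_custom_legend; infer_instance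

-- ===== CLAIM (what is proved, stated in full; the proofs are below) =====
def Claim_equal_create_custom_legend : Prop := ∀ (inner_labels : List String) (inner_colors : List String) (outer_labels : List String) (outer_colors : List String) (legend_mapping : List (String × String)), Dom_create_custom_legend inner_labels inner_colors outer_labels outer_colors legend_mapping → Spec_create_custom_legend inner_labels inner_colors outer_labels outer_colors legend_mapping (create_custom_legend inner_labels inner_colors outer_labels outer_colors legend_mapping)

-- ===== LEMMAS AND PROOFS =====

-- The group stored by A's dict loop at key k is exactly the outer pairs whose mapped parent is
-- truthy and equals k, in outer order.
theorem pvGroup_getD (m : List (String × String)) (l : List (String × String))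
    (d : PySem.Dict String (List (String × String))) (k : String) :
    (l.foldl (pvGroupStep m) d).getD k [] = d.getD k [] ++ l.filter (fun p => pvMatch m k p.1) := by
  induction l generalizing d with
  | nil => simp
  | cons p t ih =>
    rw [List.foldl_cons, ih, List.filter_cons]
    unfold pvGroupStep pvMatch
    cases hl : List.lookup p.1 m with
    | none => simp
    | some parent =>
      dsimp only
      by_cases hp : parent = ""
      · subst hp; simp
      · rw [if_pos hp]
        have hbp : (parent == "") = false := by simp [hp]
        set d1 := (if d.contains parent then d else d.insert parent []) with hd1
        have f1 : d1.getD parent [] = d.getD parent [] := by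
          rw [hd1]
          by_cases hc : d.contains parent = true
          · rw [if_pos hc]
          · rw [if_neg hc, PySem.Dict.getD_insert_self,
              PySem.Dict.getD_of_not_contains d [] (by simpa using hc)]
        have f2 : ∀ k', k' ≠ parent → d1.getD k' [] = d.getD k' [] := by
          intro k' hk'
          rw [hd1]
          by_cases hc : d.contains parent = true
          · rw [if_pos hc]
          · rw [if_neg hc, PySem.Dict.getD_insert, if_neg hk']
        rw [PySem.Dict.getD_insert]
        by_cases hk : k = parent
        · subst hk
          rw [if_pos rfl, f1]
          simp [hbp]
        · rw [if_neg hk, f2 k hk]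
          have : (parent == k) = false := by simp; exact fun h => hk h.symm
          simp [hbp, this]

-- A guarded string-appending fold is the unguarded fold over the filtered list.
theorem pvStrFoldFilter {α : Type} (p : α → Bool) (f : α → String) (l : List α) (acc : String) :
    l.foldl (fun a r => if p r then a ++ f r else a) acc
      = (l.filter p).foldl (fun a r => a ++ f r) acc := by
  induction l generalizing acc with
  | nil => rfl
  | cons x t ih =>
    rw [List.foldl_cons, List.filter_cons]
    by_cases hx : p x
    · simp [hx, ih]
    · simp [hx, ih]

theorem create_custom_legend_spec : Claim_equal_create_custom_legend := by
  intro inner_labels inner_colors outer_labels outer_colors legend_mapping _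
  unfold Spec_create_custom_legend create_custom_legend create_custom_legend_alt
  dsimp only
  congr 1
  funext acc q
  dsimp only
  congr 1
  rw [pvStrFoldFilter]
  set G := (outer_labels.zip outer_colors).foldl (pvGroupStep legend_mapping) PySem.Dict.empty with hG
  have hg : G.getD q.1 [] = (outer_labels.zip outer_colors).filter (fun p => pvMatch legend_mapping q.1 p.1) := by
    rw [hG, pvGroup_getD]; simp
  by_cases hc : G.contains q.1
  · rw [if_pos hc, hg]
  · rw [if_neg hc]
    have : G.getD q.1 [] = [] := PySem.Dict.getD_of_not_contains G [] (by simpa using hc)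
    rw [this] at hg
    rw [← hg]
    rfl

-- ===== VERDICT (by name: the statement is the Claim_ definition above) =====
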